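-- pv_equiv track=rewrite | github.com/jargenmega/indel_testing | count_indels_chart.py | parse_cigar_close_indels
-- ===== SOURCE A (Python) =====
-- MAX_INDEL_DISTANCE = 12  # Maximum distance (bp) between indels to be considered "close"
--
-- def parse_cigar_close_indels(cigar_tuples):
--     """
--     Extract only "close" indels from CIGAR tuples.
--     An indel is only included if it's within MAX_INDEL_DISTANCE bp of another indel.
--     Returns list of indel sizes (positive=insertion, negative=deletion)
--     """
--     if cigar_tuples is None:
--         return []
--
--     close_indels = []
--     last_indel_size = None
--     last_indel_added = False
--     distance_since_indel = 0
--
--     for op, length in cigar_tuples: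
--         if op == 1 or op == 2:  # Insertion or Deletion
--             indel_size = length if op == 1 else -length
--
--             if last_indel_size is not None and distance_since_indel <= MAX_INDEL_DISTANCE:
--                 # Close to previous indel
--                 if not last_indel_added:
--                     close_indels.append(last_indel_size)
--                     last_indel_added = True
--                 close_indels.append(indel_size)
--                 last_indel_size = indel_size
--                 last_indel_added = True
--             else:
--                 # First indel or too far from previous
--                 last_indel_size = indel_size
--                 last_indel_added = False
--
--             distance_since_indel = 0
--
--         elif op in [0, 7, 8, 4]:  # Match, =, X, or Soft clip (consume query)
--             distance_since_indel += length
--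
--     return close_indels
-- ===== SOURCE B (Python) =====
-- MAX_INDEL_DISTANCE = 12  # Maximum distance (bp) between indels to be considered "close"
--
-- def parse_cigar_close_indels(cigar_tuples):
--     """Two-pass version: collect (size, gap_before) records, then keep each
--     indel that is close to its predecessor or its successor."""
--     if cigar_tuples is None:
--         return []
--     # Pass 1: one record per indel, with the query-consuming gap before it.
--     records = []
--     gap = 0
--     for op, length in cigar_tuples:
--         if op == 1 or op == 2:
--             records.append((length if op == 1 else -length, gap))
--             gap = 0
--         elif op in (0, 7, 8, 4):
--             gap += length
--     # Pass 2: neighbour-closeness flags, then a single filtering comprehension.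
--     gaps_after_first = [g for _, g in records[1:]]
--     prev_close = [False] + [g <= MAX_INDEL_DISTANCE for g in gaps_after_first]
--     next_close = [g <= MAX_INDEL_DISTANCE for g in gaps_after_first] + [False]
--     return [s for (s, _), p, n in zip(records, prev_close, next_close) if p or n]
-- ===== Notes on version B (the rewrite author's own statement) =====
-- stated objective: alternative
-- what changed: Replaces the flag-threaded single loop (last_indel_size/last_indel_added/distance state) by two passes: first collect one (size, gap_before) record per indel, then keep each indel whose gap to its predecessor or successor is <= MAX_INDEL_DISTANCE via zipped neighbour flags and a filtering comprehension.
import Mathlib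
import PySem

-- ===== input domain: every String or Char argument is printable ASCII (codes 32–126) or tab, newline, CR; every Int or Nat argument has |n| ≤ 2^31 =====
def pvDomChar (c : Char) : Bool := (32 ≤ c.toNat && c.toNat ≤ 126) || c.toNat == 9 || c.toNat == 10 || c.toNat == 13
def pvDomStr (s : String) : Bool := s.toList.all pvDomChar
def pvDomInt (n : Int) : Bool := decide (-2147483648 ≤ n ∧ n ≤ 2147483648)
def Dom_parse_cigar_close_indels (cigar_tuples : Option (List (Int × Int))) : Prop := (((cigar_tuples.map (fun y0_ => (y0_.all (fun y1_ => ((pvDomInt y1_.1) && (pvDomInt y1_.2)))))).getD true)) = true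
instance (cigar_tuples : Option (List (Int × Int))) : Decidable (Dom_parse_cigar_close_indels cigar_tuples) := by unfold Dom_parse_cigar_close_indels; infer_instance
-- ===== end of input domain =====

-- B replaces A's flag-threaded single loop by a collect-records pass plus a neighbour-gap filtering pass (alternative decomposition, same cost).

-- ===== PORT A =====
-- loop body of A's for-loop (helper; state = (close_indels, last_indel_size, last_indel_added, distance_since_indel))
def pvStepA (st : List Int × Option Int × Bool × Int) (ol : Int × Int) : List Int × Option Int × Bool × Int :=
  let close_indels := st.1
  let last_indel_size := st.2.1
  let last_indel_added := st.2.2.1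
  let distance_since_indel := st.2.2.2
  let op := ol.1
  let length := ol.2
  if op == 1 || op == 2 then
    let indel_size := if op == 1 then length else -length
    match last_indel_size, decide (distance_since_indel ≤ 12) with
    | some ls, true =>
      let close_indels := if !last_indel_added then close_indels ++ [ls] else close_indels
      (close_indels ++ [indel_size], some indel_size, true, (0 : Int))
    | _, _ => (close_indels, some indel_size, false, (0 : Int))
  else if op == 0 || op == 7 || op == 8 || op == 4 then
    (close_indels, last_indel_size, last_indel_added, distance_since_indel + length)
  else st

def parse_cigar_close_indels (cigar_tuples : Option (List (Int × Int))) : List Int :=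
  match cigar_tuples with
  | none => []
  | some l => (l.foldl pvStepA ([], none, false, 0)).1

-- ===== PORT B =====
-- loop body of B's first pass (helper; state = (records, gap))
def pvStepB (st : List (Int × Int) × Int) (ol : Int × Int) : List (Int × Int) × Int :=
  let records := st.1
  let gap := st.2
  let op := ol.1
  let length := ol.2
  if op == 1 || op == 2 then
    (records ++ [((if op == 1 then length else -length), gap)], (0 : Int))
  else if op == 0 || op == 7 || op == 8 || op == 4 then
    (records, gap + length)
  else st

def parse_cigar_close_indels_alt (cigar_tuples : Option (List (Int × Int))) : List Int :=
  match cigar_tuples with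
  | none => []
  | some l =>
    let records := (l.foldl pvStepB ([], 0)).1
    let gapsAfterFirst := (records.drop 1).map (fun r => r.2)
    let prevClose := false :: gapsAfterFirst.map (fun g => decide (g ≤ 12))
    let nextClose := gapsAfterFirst.map (fun g => decide (g ≤ 12)) ++ [false]
    (records.zip (prevClose.zip nextClose)).filterMap
      (fun x => if x.2.1 || x.2.2 then some x.1.1 else none)

-- ===== PRECONDITION & SPEC =====
def Spec_parse_cigar_close_indels (cigar_tuples : Option (List (Int × Int))) (out : List Int) : Prop := out = parse_cigar_close_indels_alt cigar_tuples
instance (cigar_tuples : Option (List (Int × Int))) (out : List Int) : Decidable (Spec_parse_cigar_close_indels cigar_tuples out) := by unfold Spec_parse_cigar_close_indels; infer_instance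

-- ===== CLAIM (what is proved, stated in full; the proofs are below) =====
def Claim_equal_parse_cigar_close_indels : Prop := ∀ (cigar_tuples : Option (List (Int × Int))), Dom_parse_cigar_close_indels cigar_tuples → Spec_parse_cigar_close_indels cigar_tuples (parse_cigar_close_indels cigar_tuples)

-- ===== LEMMAS AND PROOFS =====

-- the record stream: one (size, gap_before) entry per indel, starting gap d
def pvRecs (d : Int) : List (Int × Int) → List (Int × Int)
  | [] => []
  | (op, length) :: rest =>
    if op == 1 || op == 2 then ((if op == 1 then length else -length), d) :: pvRecs 0 rest
    else if op == 0 || op == 7 || op == 8 || op == 4 then pvRecs (d + length) rest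
    else pvRecs d rest

def pvHead12 : List (Int × Int) → Bool
  | [] => false
  | (_, g) :: _ => decide (g ≤ 12)

-- filter for records all of which have a predecessor
def pvFilt : List (Int × Int) → List Int
  | [] => []
  | (s, g) :: rs => (if decide (g ≤ 12) || pvHead12 rs then [s] else []) ++ pvFilt rs

-- A's loop, restricted to the record stream
def pvRun (acc : List Int) (ls : Option Int) (la : Bool) : List (Int × Int) → List Int
  | [] => acc
  | (s, g) :: rs =>
    match ls, decide (g ≤ 12) with
    | some prev, true => pvRun ((if !la then acc ++ [prev] else acc) ++ [s]) (some s) true rs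
    | _, _ => pvRun acc (some s) false rs

def pvTop : List (Int × Int) → List Int
  | [] => []
  | (s, _) :: rs => (if pvHead12 rs then [s] else []) ++ pvFilt rs

theorem pvRun_some (rs : List (Int × Int)) : ∀ (acc : List Int) (s : Int) (la : Bool),
    pvRun acc (some s) la rs = acc ++ (if !la && pvHead12 rs then [s] else []) ++ pvFilt rs := by
  induction rs with
  | nil => intro acc s la; simp [pvRun, pvHead12, pvFilt]
  | cons r rs ih =>
    intro acc s la
    obtain ⟨s1, g1⟩ := r
    by_cases hg : g1 ≤ 12
    · simp [pvRun, hg, ih, pvHead12, pvFilt]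
      cases la <;> simp
    · simp [pvRun, hg, ih, pvHead12, pvFilt]

theorem pvRun_none (rs : List (Int × Int)) (acc : List Int) (la : Bool) :
    pvRun acc none la rs = acc ++ pvTop rs := by
  cases rs with
  | nil => simp [pvRun, pvTop]
  | cons r rs =>
    obtain ⟨s, g⟩ := r
    simp [pvRun, pvTop, pvRun_some]

-- A's fold equals pvRun on the record stream
theorem pvA_run (l : List (Int × Int)) : ∀ (acc : List Int) (ls : Option Int) (la : Bool) (d : Int),
    (l.foldl pvStepA (acc, ls, la, d)).1 = pvRun acc ls la (pvRecs d l) := by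
  induction l with
  | nil => intro acc ls la d; simp [pvRecs, pvRun]
  | cons ol rest ih =>
    intro acc ls la d
    obtain ⟨op, length⟩ := ol
    rw [List.foldl_cons]
    by_cases h12 : op == 1 || op == 2
    · cases ls with
      | none =>
        have hstep : pvStepA (acc, none, la, d) (op, length)
            = (acc, some (if op == 1 then length else -length), false, (0 : Int)) := by
          simp [pvStepA, h12]
        rw [hstep, ih]
        by_cases hd : d ≤ 12 <;> simp [pvRecs, pvRun, h12]
      | some prev =>
        by_cases hd : d ≤ 12
        · have hstep : pvStepA (acc, some prev, la, d) (op, length)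
              = ((if !la then acc ++ [prev] else acc) ++ [if op == 1 then length else -length],
                 some (if op == 1 then length else -length), true, (0 : Int)) := by
            simp [pvStepA, h12, hd]
          rw [hstep, ih]
          simp [pvRecs, pvRun, h12, hd]
        · have hstep : pvStepA (acc, some prev, la, d) (op, length)
              = (acc, some (if op == 1 then length else -length), false, (0 : Int)) := by
            simp [pvStepA, h12, hd]
          rw [hstep, ih]
          simp [pvRecs, pvRun, h12, hd]
    · by_cases hq : op == 0 || op == 7 || op == 8 || op == 4
      · have hstep : pvStepA (acc, ls, la, d) (op, length)
            = (acc, ls, la, d + length) := by simp [pvStepA, h12, hq]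
        rw [hstep, ih]
        simp [pvRecs, h12, hq]
      · have hstep : pvStepA (acc, ls, la, d) (op, length) = (acc, ls, la, d) := by
          simp [pvStepA, h12, hq]
        rw [hstep, ih]
        simp [pvRecs, h12, hq]

-- B's first pass builds the same record stream
theorem pvB_pass1 (l : List (Int × Int)) : ∀ (recs : List (Int × Int)) (g : Int),
    (l.foldl pvStepB (recs, g)).1 = recs ++ pvRecs g l := by
  induction l with
  | nil => intro recs g; simp [pvRecs]
  | cons ol rest ih =>
    intro recs g
    obtain ⟨op, length⟩ := ol
    rw [List.foldl_cons]
    by_cases h12 : op == 1 || op == 2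
    · have hstep : pvStepB (recs, g) (op, length)
          = (recs ++ [((if op == 1 then length else -length), g)], (0 : Int)) := by
        simp [pvStepB, h12]
      rw [hstep, ih]
      simp [pvRecs, h12]
    · by_cases hq : op == 0 || op == 7 || op == 8 || op == 4
      · have hstep : pvStepB (recs, g) (op, length) = (recs, g + length) := by
          simp [pvStepB, h12, hq]
        rw [hstep, ih]
        simp [pvRecs, h12, hq]
      · have hstep : pvStepB (recs, g) (op, length) = (recs, g) := by
          simp [pvStepB, h12, hq]
        rw [hstep, ih]
        simp [pvRecs, h12, hq]

-- B's zip-filter pass over records with a predecessor equals pvFilt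
theorem pvB_zip_tail (rs : List (Int × Int)) :
    ((rs.zip ((rs.map (fun r => decide (r.2 ≤ 12))).zip
        ((rs.drop 1).map (fun r => decide (r.2 ≤ 12)) ++ [false]))).filterMap
      (fun x => if x.2.1 || x.2.2 then some x.1.1 else none)) = pvFilt rs := by
  induction rs with
  | nil => simp [pvFilt]
  | cons r rs ih =>
    obtain ⟨s, g⟩ := r
    cases rs with
    | nil => by_cases hg : g ≤ 12 <;> simp [pvFilt, pvHead12, hg]
    | cons r2 rs2 =>
      obtain ⟨s2, g2⟩ := r2
      simp only [List.drop_succ_cons, List.drop_zero, List.map_cons] at ih ⊢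
      simp only [List.zip_cons_cons, List.cons_append, List.filterMap_cons]
      rw [ih]
      by_cases h1 : g ≤ 12 <;> by_cases h2 : g2 ≤ 12 <;>
        simp [pvFilt, pvHead12, h1, h2]

-- B's full second pass equals pvTop
theorem pvB_pass2 (records : List (Int × Int)) :
    ((records.zip ((false :: ((records.drop 1).map (fun r => r.2)).map (fun g => decide (g ≤ 12))).zip
        (((records.drop 1).map (fun r => r.2)).map (fun g => decide (g ≤ 12)) ++ [false]))).filterMap
      (fun x => if x.2.1 || x.2.2 then some x.1.1 else none)) = pvTop records := by
  cases records with
  | nil => simp [pvTop]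
  | cons r rs =>
    obtain ⟨s, g⟩ := r
    cases rs with
    | nil => simp [pvTop, pvHead12, pvFilt]
    | cons r2 rs2 =>
      obtain ⟨s2, g2⟩ := r2
      have h := pvB_zip_tail ((s2, g2) :: rs2)
      simp only [List.drop_succ_cons, List.drop_zero, List.map_cons, List.map_map,
        Function.comp_def] at h ⊢
      simp only [List.zip_cons_cons, List.cons_append, List.filterMap_cons]
      rw [h]
      by_cases h2 : g2 ≤ 12 <;> simp [pvTop, pvHead12, h2]

-- ===== VERDICT (by name: the statement is the Claim_ definition above) =====
theorem parse_cigar_close_indels_spec : Claim_equal_parse_cigar_close_indels := by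
  intro cigar_tuples _
  unfold Spec_parse_cigar_close_indels parse_cigar_close_indels parse_cigar_close_indels_alt
  cases cigar_tuples with
  | none => rfl
  | some l =>
    simp only [pvA_run, pvB_pass1, List.nil_append, pvB_pass2, pvRun_none]
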